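-- pv_equiv track=rewrite | github.com/Sendy459/-LeetCode-Solutions-by-Daniel-Senderovych | Geeks_for_Geeks_Contests/GFG_Contest_98/AntiqueCollections_GFG.py | antiqueItems
-- ===== SOURCE A (Python) =====
-- from typing import List
--
-- def antiqueItems(n : int, items : List[int], price : List[int]) -> int:
--         dic = {}
--
--         def add_to_dict(dic,key, value):
--             if key not in dic:
--                 dic[key] = value
--             else:
--                 if (dic[key] > value):
--                     dic[key] = value
--         for i in range(n):
--             add_to_dict(dic, items[i], price[i])
--         return sum(dic.values())
-- ===== SOURCE B (Python) =====
-- def antiqueItems(n, items, price):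
--     pairs = [(items[i], price[i]) for i in range(n)]
--     seen = []
--     total = 0
--     for k, _ in pairs:
--         if k not in seen:
--             seen.append(k)
--             total += min(q for k2, q in pairs if k2 == k)
--     return total
-- ===== Notes on version B (the rewrite author's own statement) =====
-- stated objective: alternative
-- what changed: Replaced the running-minimum dict (hash map updated per element, then summed) by a scan that, at each key's first occurrence, adds the minimum price computed over all matching pairs.
import Mathlib
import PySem

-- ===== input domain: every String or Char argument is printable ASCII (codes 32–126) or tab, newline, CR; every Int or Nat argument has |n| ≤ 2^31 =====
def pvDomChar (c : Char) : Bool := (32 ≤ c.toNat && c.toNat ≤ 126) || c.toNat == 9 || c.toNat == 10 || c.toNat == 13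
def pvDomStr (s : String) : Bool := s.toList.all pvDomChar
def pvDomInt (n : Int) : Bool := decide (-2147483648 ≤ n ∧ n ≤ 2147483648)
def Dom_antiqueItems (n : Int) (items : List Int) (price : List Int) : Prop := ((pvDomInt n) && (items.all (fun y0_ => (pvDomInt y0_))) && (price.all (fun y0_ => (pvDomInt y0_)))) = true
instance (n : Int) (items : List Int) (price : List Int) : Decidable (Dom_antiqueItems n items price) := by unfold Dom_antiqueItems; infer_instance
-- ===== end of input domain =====

-- B replaces A's running-minimum dict by a first-occurrence scan over zipped pairs; objective: alternative decomposition.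

-- ===== PORT A =====
-- helper add_to_dict
def pvAddToDict (dic : PySem.Dict Int Int) (key value : Int) : PySem.Dict Int Int :=
  match dic.get? key with
  | none => dic.insert key value
  | some v => if v > value then dic.insert key value else dic

def antiqueItems (n : Int) (items : List Int) (price : List Int) : Int :=
  let dic := (PySem.List.pyRange 0 n 1).foldl
    (fun d i => pvAddToDict d (PySem.List.pyGetD items i 0) (PySem.List.pyGetD price i 0))
    PySem.Dict.empty
  dic.values.sum

-- ===== PORT B =====
-- min(q for k2, q in pairs if k2 == k)  (only called with k occurring in pairs)
def pvMinFor (pairs : List (Int × Int)) (k : Int) : Int :=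
  (PySem.List.min? ((pairs.filter (fun p => p.1 == k)).map Prod.snd) (fun x => x)).getD 0

def antiqueItems_alt (n : Int) (items : List Int) (price : List Int) : Int :=
  let pairs := (PySem.List.pyRange 0 n 1).map
    (fun i => (PySem.List.pyGetD items i 0, PySem.List.pyGetD price i 0))
  (pairs.foldl
    (fun st p =>
      if st.1.contains p.1 then st
      else (st.1 ++ [p.1], st.2 + pvMinFor pairs p.1))
    (([] : List Int), (0 : Int))).2

-- ===== PRECONDITION & SPEC =====
-- Pre_ excludes exactly the inputs where A raises IndexError (n beyond either list's length).
def Pre_antiqueItems (n : Int) (items : List Int) (price : List Int) : Prop :=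
  n ≤ (items.length : Int) ∧ n ≤ (price.length : Int)
instance (n : Int) (items : List Int) (price : List Int) : Decidable (Pre_antiqueItems n items price) := by unfold Pre_antiqueItems; infer_instance

def pvWitness_antiqueItems : Int × List Int × List Int := (2, [1, 1], [5, 3])

def Spec_antiqueItems (n : Int) (items : List Int) (price : List Int) (out : Int) : Prop := out = antiqueItems_alt n items price
instance (n : Int) (items : List Int) (price : List Int) (out : Int) : Decidable (Spec_antiqueItems n items price out) := by unfold Spec_antiqueItems; infer_instance

-- ===== CLAIM (what is proved, stated in full; the proofs are below) =====
def Claim_equal_antiqueItems : Prop := ∀ (n : Int) (items : List Int) (price : List Int), Dom_antiqueItems n items price → Pre_antiqueItems n items price → Spec_antiqueItems n items price (antiqueItems n items price)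

-- ===== LEMMAS AND PROOFS =====

-- keys of L not yet in seen, in first-occurrence order
def pvNewK (seen : List Int) : List (Int × Int) → List Int
  | [] => []
  | p :: t => if p.1 ∈ seen then pvNewK seen t else p.1 :: pvNewK (seen ++ [p.1]) t

-- running minimum of matching prices, starting from a
def pvUpd (k : Int) (t : List (Int × Int)) (a : Int) : Int :=
  t.foldl (fun a q => if q.1 = k then min a q.2 else a) a

theorem pvNewK_not_mem_seen (L : List (Int × Int)) : ∀ (seen : List Int) (k : Int),
    k ∈ pvNewK seen L → k ∉ seen := by
  induction L with
  | nil => intro seen k h; simp [pvNewK] at h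
  | cons p t ih =>
    intro seen k h
    by_cases hc : p.1 ∈ seen
    · rw [pvNewK, if_pos hc] at h; exact ih seen k h
    · rw [pvNewK, if_neg hc] at h
      rcases List.mem_cons.mp h with h | h
      · subst h; exact hc
      · intro hk; exact ih (seen ++ [p.1]) k h (by simp [hk])

theorem pvMinFor_cons_ne (p : Int × Int) (t : List (Int × Int)) (k : Int) (h : p.1 ≠ k) :
    pvMinFor (p :: t) k = pvMinFor t k := by
  simp [pvMinFor, h]

theorem foldl_min_filter (k : Int) (t : List (Int × Int)) : ∀ (a : Int),
    ((t.filter (fun q => q.1 == k)).map Prod.snd).foldl min a = pvUpd k t a := by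
  induction t with
  | nil => intro a; simp [pvUpd]
  | cons q t ih =>
    intro a
    by_cases hq : q.1 = k
    · simp [hq, pvUpd, List.foldl_cons] at *
      exact ih (min a q.2)
    · simp [hq, pvUpd, List.foldl_cons] at *
      exact ih a

theorem pvMinFor_cons_self (k p : Int) (t : List (Int × Int)) :
    pvMinFor ((k, p) :: t) k = pvUpd k t p := by
  simp [pvMinFor, PySem.List.min?_id_cons]
  exact foldl_min_filter k t p

theorem pvUpd_cons_self (k p : Int) (t : List (Int × Int)) (a : Int) :
    pvUpd k ((k, p) :: t) a = pvUpd k t (min a p) := by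
  simp [pvUpd]

theorem pvUpd_cons_ne (k : Int) (q : Int × Int) (t : List (Int × Int)) (a : Int) (h : q.1 ≠ k) :
    pvUpd k (q :: t) a = pvUpd k t a := by
  simp [pvUpd, h]

-- the B-side fold, over an arbitrary fixed pair list P
theorem B_fold (P : List (Int × Int)) (L : List (Int × Int)) : ∀ (seen : List Int) (total : Int),
    L.foldl
      (fun st p => if p.1 ∈ st.1 then st else (st.1 ++ [p.1], st.2 + pvMinFor P p.1))
      (seen, total)
    = (seen ++ pvNewK seen L, total + ((pvNewK seen L).map (pvMinFor P)).sum) := by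
  induction L with
  | nil => intro seen total; simp [pvNewK]
  | cons p t ih =>
    intro seen total
    by_cases hc : p.1 ∈ seen
    · simp only [List.foldl_cons, if_pos hc, ih]
      rw [pvNewK, if_pos hc]
    · simp only [List.foldl_cons, if_neg hc, ih]
      rw [pvNewK, if_neg hc]
      simp only [List.cons_append, List.append_assoc,
        List.map_cons, List.sum_cons, Prod.mk.injEq]
      exact ⟨by simp, by ring⟩

-- the A-side dict fold, characterised entry by entry
theorem A_fold (L : List (Int × Int)) : ∀ (d : PySem.Dict Int Int), d.keys.Nodup →
    (L.foldl (fun d p => pvAddToDict d p.1 p.2) d).items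
    = d.items.map (fun kv => (kv.1, pvUpd kv.1 L kv.2))
      ++ (pvNewK d.keys L).map (fun k => (k, pvMinFor L k)) := by
  induction L with
  | nil => intro d _; simp [pvNewK, pvUpd]
  | cons p t ih =>
    intro d hnd
    obtain ⟨k, v⟩ := p
    match hg : d.get? k with
    | some w =>
      have hcont : d.contains k = true := by
        rw [PySem.Dict.contains_eq_isSome_get?, hg]; rfl
      have hmemk : k ∈ d.keys := (PySem.Dict.contains_iff_mem_keys d k).mp hcont
      have hkc : d.keys.contains k = true := by simpa using hmemk
      -- pvAddToDict d k v = d.insert k (min w v)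
      have hstep : pvAddToDict d k v = d.insert k (min w v) := by
        simp only [pvAddToDict, hg]
        by_cases hwv : w > v
        · have hmin : min w v = v := by omega
          rw [if_pos hwv, hmin]
        · have hmin : min w v = w := by omega
          rw [if_neg hwv, hmin]
          symm
          apply PySem.Dict.ext
          rw [PySem.Dict.items_insert_of_contains d _ hcont]
          have hmap : d.items.map (fun p => if (p.1 == k) = true then (k, w) else p)
              = d.items.map id := by
            apply List.map_congr_left
            intro q hq
            by_cases hqk : q.1 = k
            · have hgq : d.get? q.1 = some q.2 :=
                PySem.Dict.get?_of_mem_items d (by simpa using hq) hnd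
              rw [hqk, hg] at hgq
              have hq2 : q.2 = w := by injection hgq with h; omega
              simp only [hqk, BEq.rfl, if_pos, id]
              rw [← hqk, ← hq2]
            · simp [hqk]
          rw [hmap, List.map_id]
      have hkeys : (d.insert k (min w v)).keys = d.keys :=
        PySem.Dict.keys_insert_of_contains d (min w v) hcont
      have hnd' : (d.insert k (min w v)).keys.Nodup := by rw [hkeys]; exact hnd
      simp only [List.foldl_cons, hstep]
      rw [ih _ hnd', hkeys]
      rw [PySem.Dict.items_insert_of_contains d _ hcont]
      rw [List.map_map]
      congr 1
      · -- existing entries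
        apply List.map_congr_left
        intro q hq
        by_cases hqk : q.1 = k
        · have hgq : d.get? q.1 = some q.2 := PySem.Dict.get?_of_mem_items d (by simpa using hq) hnd
          rw [hqk, hg] at hgq
          have hq2 : q.2 = w := by injection hgq with h; omega
          have hq1 : (q.1 == k) = true := by simp [hqk]
          simp only [Function.comp, hq1, if_pos]
          rw [hqk, hq2, pvUpd_cons_self]
        · have hq1 : (q.1 == k) = false := by simp [hqk]
          simp only [Function.comp, hq1, Bool.false_eq_true, if_false]
          rw [pvUpd_cons_ne q.1 (k, v) t q.2 (fun h => hqk h.symm)]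
      · -- new entries
        have hnewk : pvNewK d.keys ((k, v) :: t) = pvNewK d.keys t := by
          rw [pvNewK, if_pos hmemk]
        rw [hnewk]
        apply List.map_congr_left
        intro k' hk'
        have hk'ne : k' ≠ k := by
          intro h; exact pvNewK_not_mem_seen t d.keys k' hk' (h ▸ hmemk)
        rw [pvMinFor_cons_ne (k, v) t k' (by simpa using hk'ne.symm)]
    | none =>
      have hcont : d.contains k = false := by
        rw [PySem.Dict.contains_eq_isSome_get?, hg]; rfl
      have hnmemk : k ∉ d.keys := fun h =>
        by rw [(PySem.Dict.contains_iff_mem_keys d k).mpr h] at hcont; cases hcont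
      have hkc : d.keys.contains k = false := by simpa using hnmemk
      have hstep : pvAddToDict d k v = d.insert k v := by simp [pvAddToDict, hg]
      have hitems : (d.insert k v).items = d.items ++ [(k, v)] :=
        PySem.Dict.items_insert_of_not_contains d v hcont
      have hkeys : (d.insert k v).keys = d.keys ++ [k] :=
        PySem.Dict.keys_insert_of_not_contains d v hcont
      have hnd' : (d.insert k v).keys.Nodup := by
        rw [hkeys]; simpa [List.nodup_append] using ⟨hnd, fun a ha h => hnmemk (h ▸ ha)⟩
      simp only [List.foldl_cons, hstep]
      rw [ih _ hnd', hkeys, hitems]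
      rw [List.map_append]
      have hnewk : pvNewK d.keys ((k, v) :: t) = k :: pvNewK (d.keys ++ [k]) t := by
        rw [pvNewK, if_neg hnmemk]
      rw [hnewk]
      simp only [List.map_cons, List.map_nil, List.append_assoc, List.singleton_append]
      congr 1
      · -- old entries: head of L irrelevant
        apply List.map_congr_left
        intro q hq
        have hqk : q.1 ≠ k := by
          intro h
          exact hnmemk (h ▸ PySem.Dict.mem_keys_of_mem_items d hq)
        rw [pvUpd_cons_ne q.1 (k, v) t q.2 (fun h => hqk h.symm)]
      · congr 1
        · -- the freshly inserted key
          rw [pvMinFor_cons_self]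
        · -- remaining new keys
          apply List.map_congr_left
          intro k' hk'
          have hk'ne : k' ≠ k := by
            intro h
            exact pvNewK_not_mem_seen t (d.keys ++ [k]) k' hk' (by simp [h])
          rw [pvMinFor_cons_ne (k, v) t k' (by simpa using hk'ne.symm)]

-- ===== VERDICT (by name: the statement is the Claim_ definition above) =====
theorem antiqueItems_spec : Claim_equal_antiqueItems := by
  intro n items price _ _
  simp only [Spec_antiqueItems, antiqueItems, antiqueItems_alt, List.contains_eq_mem,
    decide_eq_true_eq]
  have hA : (PySem.List.pyRange 0 n 1).foldl
      (fun d i => pvAddToDict d (PySem.List.pyGetD items i 0) (PySem.List.pyGetD price i 0))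
      PySem.Dict.empty
    = ((PySem.List.pyRange 0 n 1).map
        (fun i => (PySem.List.pyGetD items i 0, PySem.List.pyGetD price i 0))).foldl
      (fun d p => pvAddToDict d p.1 p.2) PySem.Dict.empty := by
    rw [List.foldl_map]
  rw [hA]
  set pairs : List (Int × Int) :=
    (PySem.List.pyRange 0 n 1).map
      (fun i => (PySem.List.pyGetD items i 0, PySem.List.pyGetD price i 0)) with hpairs
  rw [B_fold pairs pairs [] 0]
  simp only [PySem.Dict.values]
  rw [A_fold pairs PySem.Dict.empty PySem.Dict.nodup_keys_empty]
  simp [PySem.Dict.empty, PySem.Dict.keys, List.map_map]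
  rfl
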